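-- pv_equiv track=rewrite | github.com/Linzwcs/AutoMusicTheoryQA | src/AutoMusicTheoryQA/scale/scale_selection.py | convert_scale_to_abc
-- ===== SOURCE A (Python) =====
-- def convert_scale_to_abc(scale):
--     abc_scale = []
--
--     flag = True
--     for note in reversed(scale):
--         if "B" in note and flag:
--             flag = False
--         if flag == True:
--             note = note.lower()
--         if len(note) == 2:
--             if note[1] == "#":
--                 note = "^" + note[0]
--             elif note[1] == "b":
--                 note = "_" + note[0]
--         abc_scale = [note] + abc_scale
--     abc_scale = abc_scale + [abc_scale[0].lower()]
--     return abc_scale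
-- ===== SOURCE B (Python) =====
-- def convert_scale_to_abc(scale):
--     # pivot: largest index whose note contains "B", or -1
--     p = -1
--     for i, note in enumerate(scale):
--         if "B" in note:
--             p = i
--     out = []
--     for i, note in enumerate(scale):
--         if i > p:
--             note = note.lower()
--         if len(note) == 2:
--             if note[1] == "#":
--                 note = "^" + note[0]
--             elif note[1] == "b":
--                 note = "_" + note[0]
--         out.append(note)
--     out.append(out[0].lower())
--     return out
-- ===== Notes on version B (the rewrite author's own statement) =====
-- stated objective: faster
-- what changed: Replaces the reversed traversal with a lowercase-flag and quadratic list prepending by precomputing the last index containing 'B' and then a single forward pass that appends, lowercasing exactly the notes after that pivot.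
import Mathlib
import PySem

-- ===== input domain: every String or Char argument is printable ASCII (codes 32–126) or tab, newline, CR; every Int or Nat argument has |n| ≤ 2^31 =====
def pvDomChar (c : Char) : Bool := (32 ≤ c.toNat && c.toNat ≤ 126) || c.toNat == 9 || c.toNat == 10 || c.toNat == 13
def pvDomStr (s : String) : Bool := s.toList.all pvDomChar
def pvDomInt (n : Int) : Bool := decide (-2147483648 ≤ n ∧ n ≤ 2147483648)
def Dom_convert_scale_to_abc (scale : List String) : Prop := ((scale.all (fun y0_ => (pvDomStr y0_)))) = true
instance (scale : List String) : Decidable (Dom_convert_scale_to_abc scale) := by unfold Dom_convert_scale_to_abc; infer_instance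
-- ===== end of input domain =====

-- B precomputes the last index containing "B" and builds the list in one forward
-- append pass, instead of A's reversed traversal with a flag and list prepending.

-- shared helpers: both Python versions contain these exact snippets inline
-- '"B" in note'
def pvHasB (note : String) : Bool := PySem.Str.isIn "B" note

-- 'if len(note) == 2: if note[1] == "#": note = "^"+note[0] elif note[1] == "b": note = "_"+note[0]'
-- (len and indexing done on the character list, exact for Python strings)
def pvFixAcc (note : String) : String :=
  match note.toList with
  | [c0, c1] =>
      if c1 = '#' then String.ofList ['^', c0]
      else if c1 = 'b' then String.ofList ['_', c0]
      else note
  | _ => note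

-- ===== PORT A =====
-- the 'for note in reversed(scale)' loop, carrying (flag, abc_scale)
def pvALoop : List String → Bool → List String → Bool × List String
  | [], flag, abc => (flag, abc)
  | note :: rest, flag, abc =>
      let flag := if pvHasB note && flag then false else flag
      let note := if flag then PySem.Str.lower note else note
      let note := pvFixAcc note
      pvALoop rest flag ([note] ++ abc)

def convert_scale_to_abc (scale : List String) : List String :=
  let r := pvALoop scale.reverse true []
  match r.2 with
  | [] => []          -- Python raises IndexError on abc_scale[0]; excluded by Pre_
  | h :: _ => r.2 ++ [PySem.Str.lower h]

-- ===== PORT B =====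
-- 'for i, note in enumerate(scale): if "B" in note: p = i'
def pvPivotLoop : List String → Int → Int → Int
  | [], _, p => p
  | note :: rest, i, p => pvPivotLoop rest (i + 1) (if pvHasB note then i else p)

-- the forward building loop (append order = cons order of the recursion)
def pvBLoop : List String → Int → Int → List String
  | [], _, _ => []
  | note :: rest, i, p =>
      let note := if i > p then PySem.Str.lower note else note
      let note := pvFixAcc note
      note :: pvBLoop rest (i + 1) p

def convert_scale_to_abc_alt (scale : List String) : List String :=
  let p := pvPivotLoop scale 0 (-1)
  let out := pvBLoop scale 0 p
  match out with
  | [] => []          -- Python raises IndexError on out[0]; excluded by Pre_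
  | h :: _ => out ++ [PySem.Str.lower h]

-- ===== PRECONDITION & SPEC =====
-- Both Pythons raise IndexError on the empty list (indexing element 0 of the result).
def Pre_convert_scale_to_abc (scale : List String) : Prop := scale ≠ []
instance (scale : List String) : Decidable (Pre_convert_scale_to_abc scale) := by
  unfold Pre_convert_scale_to_abc; infer_instance

def pvWitness_convert_scale_to_abc : List String := ["C", "D#", "Bb", "A"]

def Spec_convert_scale_to_abc (scale : List String) (out : List String) : Prop :=
  out = convert_scale_to_abc_alt scale
instance (scale : List String) (out : List String) : Decidable (Spec_convert_scale_to_abc scale out) := by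
  unfold Spec_convert_scale_to_abc; infer_instance

-- ===== CLAIM (what is proved, stated in full; the proofs are below) =====
def Claim_equal_convert_scale_to_abc : Prop :=
  ∀ (scale : List String), Dom_convert_scale_to_abc scale →
    Pre_convert_scale_to_abc scale →
    Spec_convert_scale_to_abc scale (convert_scale_to_abc scale)

-- ===== LEMMAS AND PROOFS =====

-- reference form: element lowered iff flag and no "B" anywhere in its suffix (itself included)
def pvRef (flag : Bool) : List String → List String
  | [] => []
  | note :: rest =>
      pvFixAcc (if flag && !pvHasB note && rest.all (fun n => !pvHasB n)
                then PySem.Str.lower note else note) :: pvRef flag rest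

theorem pvRef_append (flag : Bool) (x : String) (l : List String) :
    pvRef flag (l ++ [x]) =
      pvRef (flag && !pvHasB x) l
        ++ [pvFixAcc (if flag && !pvHasB x then PySem.Str.lower x else x)] := by
  induction l with
  | nil => simp [pvRef]
  | cons n rest ih =>
      simp only [List.cons_append, pvRef, ih, List.all_append, List.all_cons, List.all_nil]
      congr 3
      cases flag <;> cases pvHasB x <;> cases pvHasB n <;>
        cases rest.all (fun n => !pvHasB n) <;> rfl

theorem pvALoop_eq (r : List String) : ∀ (flag : Bool) (acc : List String),
    pvALoop r flag acc = (flag && r.all (fun n => !pvHasB n), pvRef flag r.reverse ++ acc) := by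
  induction r with
  | nil => intro flag acc; simp [pvALoop, pvRef]
  | cons n rest ih =>
      intro flag acc
      have hflag : (if (pvHasB n && flag) = true then false else flag) = (flag && !pvHasB n) := by
        cases flag <;> cases pvHasB n <;> rfl
      simp only [pvALoop, hflag, ih, List.reverse_cons, pvRef_append, List.all_cons,
        List.append_assoc, List.singleton_append, Prod.mk.injEq]
      constructor
      · cases flag <;> cases pvHasB n <;> simp
      · trivial

theorem pvPivotLoop_of_all (l : List String) : ∀ (i p : Int),
    l.all (fun n => !pvHasB n) = true → pvPivotLoop l i p = p := by
  induction l with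
  | nil => intro i p _; rfl
  | cons n rest ih =>
      intro i p h
      simp only [List.all_cons, Bool.and_eq_true, Bool.not_eq_true'] at h
      simp only [pvPivotLoop, h.1]
      rw [if_neg (by simp)]
      exact ih _ _ h.2

theorem pvPivotLoop_ge (l : List String) : ∀ (i p : Int),
    p ≤ i → p ≤ pvPivotLoop l i p := by
  induction l with
  | nil => intro i p h; exact le_refl p
  | cons n rest ih =>
      intro i p h
      simp only [pvPivotLoop]
      by_cases hb : pvHasB n = true
      · rw [if_pos hb]
        exact le_trans h (ih (i + 1) i (by omega))
      · rw [if_neg hb]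
        exact ih (i + 1) p (by omega)

theorem pvPivotLoop_ge_of_some (l : List String) : ∀ (i p : Int),
    l.all (fun n => !pvHasB n) = false → i ≤ pvPivotLoop l i p := by
  induction l with
  | nil => intro i p h; simp at h
  | cons n rest ih =>
      intro i p h
      simp only [pvPivotLoop]
      by_cases hb : pvHasB n = true
      · rw [if_pos hb]
        exact pvPivotLoop_ge rest (i + 1) i (by omega)
      · rw [if_neg hb]
        replace hb : pvHasB n = false := by simpa using hb
        simp only [List.all_cons, hb, Bool.not_false, Bool.true_and] at h
        have := ih (i + 1) p h
        omega

theorem pvBLoop_eq (l : List String) : ∀ (i p : Int), p < i →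
    pvBLoop l i (pvPivotLoop l i p) = pvRef true l := by
  induction l with
  | nil => intro i p _; rfl
  | cons n rest ih =>
      intro i p hp
      have htail : ∀ q : Int, q < i + 1 →
          pvBLoop rest (i + 1) (pvPivotLoop rest (i + 1) q) = pvRef true rest :=
        fun q hq => ih (i + 1) q hq
      by_cases hb : pvHasB n = true
      · have hP : i ≤ pvPivotLoop rest (i + 1) i := pvPivotLoop_ge rest (i + 1) i (by omega)
        simp only [pvPivotLoop, pvBLoop, pvRef, hb, if_true, Bool.not_true,
          Bool.false_and, Bool.true_and, if_neg (Bool.false_ne_true)]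
        rw [if_neg (show ¬ i > pvPivotLoop rest (i + 1) i by omega), htail i (by omega)]
      · replace hb : pvHasB n = false := by simpa using hb
        simp only [pvPivotLoop, pvBLoop, pvRef, hb, Bool.not_false, Bool.true_and]
        rw [if_neg (show ¬ false = true by simp)]
        by_cases hall : rest.all (fun n => !pvHasB n) = true
        · have ht := htail p (by omega)
          rw [pvPivotLoop_of_all rest _ _ hall] at ht
          rw [pvPivotLoop_of_all rest _ _ hall, if_pos hp, hall, if_pos rfl, ht]
        · replace hall : rest.all (fun n => !pvHasB n) = false := by simpa using hall
          have hP : i + 1 ≤ pvPivotLoop rest (i + 1) p :=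
            pvPivotLoop_ge_of_some rest (i + 1) p hall
          rw [if_neg (show ¬ i > pvPivotLoop rest (i + 1) p by omega), hall,
              if_neg (show ¬ false = true by simp), htail p (by omega)]

theorem pvLists_eq (scale : List String) :
    (pvALoop scale.reverse true []).2 = pvBLoop scale 0 (pvPivotLoop scale 0 (-1)) := by
  rw [pvALoop_eq, pvBLoop_eq scale 0 (-1) (by omega)]
  simp

-- ===== VERDICT (by name: the statement is the Claim_ definition above) =====
theorem convert_scale_to_abc_spec : Claim_equal_convert_scale_to_abc := by
  intro scale _ _
  show convert_scale_to_abc scale = convert_scale_to_abc_alt scale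
  unfold convert_scale_to_abc convert_scale_to_abc_alt
  simp only [pvLists_eq scale]
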